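-- pv_equiv track=rewrite | github.com/adeministratorr/cyberpanel-vault | serverBackupManager/services.py | _last_log_line
-- ===== SOURCE A (Python) =====
-- def _last_log_line(log_content: str) -> str:
--     if not log_content:
--         return ""
--
--     for line in reversed(log_content.splitlines()):
--         clean = line.strip()
--         if clean:
--             return clean
--     return ""
-- ===== SOURCE B (Python) =====
-- def _last_log_line(log_content: str) -> str:
--     last = ""
--     for line in log_content.splitlines():
--         clean = line.strip()
--         if clean:
--             last = clean
--     return last
-- ===== Notes on version B (the rewrite author's own statement) =====
-- stated objective: simpler
-- what changed: Replaces the reversed traversal with early return (and the empty-content guard) by a single forward pass keeping a last-wins accumulator of the stripped non-empty line.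
import Mathlib
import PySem

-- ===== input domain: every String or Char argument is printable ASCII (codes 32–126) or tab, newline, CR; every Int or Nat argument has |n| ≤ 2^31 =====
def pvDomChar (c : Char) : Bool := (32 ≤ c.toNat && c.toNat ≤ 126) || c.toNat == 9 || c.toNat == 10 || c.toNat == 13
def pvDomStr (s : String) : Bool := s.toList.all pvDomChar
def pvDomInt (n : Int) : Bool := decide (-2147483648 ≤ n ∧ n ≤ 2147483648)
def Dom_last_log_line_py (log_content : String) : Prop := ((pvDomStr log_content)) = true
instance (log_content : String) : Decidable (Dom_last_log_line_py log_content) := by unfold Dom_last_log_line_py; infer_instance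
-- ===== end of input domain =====

-- B: single forward pass with a last-wins accumulator instead of A's reversed scan with early return (same values; objective: simpler).
-- ===== PORT A =====
def pvGoA : List String → String
  | [] => ""
  | l :: ls =>
      let clean := PySem.Str.strip l
      if clean ≠ "" then clean else pvGoA ls

def last_log_line_py (log_content : String) : String :=
  if log_content = "" then ""
  else pvGoA (PySem.Str.splitlines log_content).reverse

-- ===== PORT B =====
def last_log_line_py_alt (log_content : String) : String :=
  (PySem.Str.splitlines log_content).foldl
    (fun last line =>
      let clean := PySem.Str.strip line
      if clean ≠ "" then clean else last) ""

-- ===== PRECONDITION & SPEC =====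
def Spec_last_log_line_py (log_content : String) (out : String) : Prop := out = last_log_line_py_alt log_content
instance (log_content : String) (out : String) : Decidable (Spec_last_log_line_py log_content out) := by unfold Spec_last_log_line_py; infer_instance

-- ===== CLAIM (what is proved, stated in full; the proofs are below) =====
def Claim_equal_last_log_line_py : Prop := ∀ (log_content : String), Dom_last_log_line_py log_content → Spec_last_log_line_py log_content (last_log_line_py log_content)

-- ===== LEMMAS AND PROOFS =====

-- ===== VERDICT (by name: the statement is the Claim_ definition above) =====
lemma foldl_eq_goA (ls : List String) (acc : String) :
    ls.foldl (fun last line =>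
      let clean := PySem.Str.strip line
      if clean ≠ "" then clean else last) acc
      = (if pvGoA ls.reverse ≠ "" then pvGoA ls.reverse else acc) := by
  induction ls using List.reverseRecOn generalizing acc with
  | nil => simp [pvGoA]
  | append_singleton ys y ih =>
      rw [List.foldl_append, List.reverse_append]
      simp only [List.reverse_singleton, List.singleton_append, List.foldl_cons,
        List.foldl_nil, pvGoA]
      rw [ih]
      by_cases h : PySem.Str.strip y = "" <;> simp [h]

theorem last_log_line_py_spec : Claim_equal_last_log_line_py := by
  intro lc _
  unfold Spec_last_log_line_py last_log_line_py last_log_line_py_alt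
  rw [foldl_eq_goA]
  by_cases he : lc = ""
  · subst he; decide
  · simp only [he, if_false]
    by_cases h : pvGoA (PySem.Str.splitlines lc).reverse = "" <;> simp [h]
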